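-- pv_equiv track=rewrite | github.com/rodalgar/aoc | AOC2023/aoc2023-day04/Main.py | part2
-- ===== SOURCE A (Python) =====
-- Card = tuple[int, list[int], list[int]]
--
-- def calculate_matches(card: Card) -> int:
--     set_winning = set(card[1])
--     set_my_numbers = set(card[2])
--
--     matches = set_my_numbers.intersection(set_winning)
--     return len(matches)
--
-- def part2(cards: list[Card]) -> int:
--     card_instances = {i + 1: 1 for i in range(len(cards))}
--
--     for ix, card in enumerate(cards, start=1):
--         n_matches = calculate_matches(card)
--         if n_matches > 0:
--             self_occurrence = card_instances[ix]
--             for i in range(n_matches):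
--                 card_instances[ix + i + 1] += self_occurrence
--
--     return sum(card_instances.values())
-- ===== SOURCE B (Python) =====
-- def part2(cards):
--     # Single reverse pass: each card's total yield (itself + cascaded wins) is
--     # gathered once by pulling from the already-computed totals of later cards.
--     totals = []
--     for card in reversed(cards):
--         n_matches = len(set(card[1]) & set(card[2]))
--         totals.insert(0, 1 + sum(totals[:n_matches]))
--     return sum(totals)
-- ===== Notes on version B (the rewrite author's own statement) =====
-- stated objective: simpler
-- what changed: A scatters each card's multiplicity forward into a dict of per-card instance counts; B makes one reverse pass over a plain list, computing each card's total yield once by pulling the already-known totals of the following cards, and sums them (no dict, no inner scatter loop).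
import Mathlib
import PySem

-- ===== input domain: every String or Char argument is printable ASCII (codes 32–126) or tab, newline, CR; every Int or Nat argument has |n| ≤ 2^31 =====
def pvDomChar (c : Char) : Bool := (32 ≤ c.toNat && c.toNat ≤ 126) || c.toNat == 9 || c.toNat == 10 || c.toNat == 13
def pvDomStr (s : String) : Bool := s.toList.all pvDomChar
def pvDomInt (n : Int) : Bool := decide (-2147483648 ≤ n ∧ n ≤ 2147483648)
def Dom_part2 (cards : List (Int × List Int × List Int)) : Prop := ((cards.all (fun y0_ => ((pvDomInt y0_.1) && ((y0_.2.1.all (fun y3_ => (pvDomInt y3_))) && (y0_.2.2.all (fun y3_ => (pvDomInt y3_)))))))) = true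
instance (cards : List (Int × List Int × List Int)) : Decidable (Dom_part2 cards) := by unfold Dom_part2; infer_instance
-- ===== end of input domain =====

-- B replaces A's forward scatter of copy counts through a dict by a single reverse
-- pass over a plain list that pulls each card's total yield once (objective: simpler).

-- ===== PORT A =====
def calculateMatches (card : Int × List Int × List Int) : Int :=
  let setWinning : PySem.Set Int := PySem.Set.ofList card.2.1
  let setMyNumbers : PySem.Set Int := PySem.Set.ofList card.2.2
  PySem.Set.len (PySem.Set.inter setMyNumbers setWinning)

def part2 (cards : List (Int × List Int × List Int)) : Int :=
  -- card_instances = {i + 1: 1 for i in range(len(cards))}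
  let cardInstances : PySem.Dict Int Int :=
    (PySem.List.pyRange 0 (cards.length : Int)).foldl
      (fun d i => d.insert (i + 1) 1) PySem.Dict.empty
  -- for ix, card in enumerate(cards, start=1): …
  -- card_instances[ix + i + 1] += self_occurrence  is read-then-store; the read
  -- raises KeyError on a missing key (excluded by Pre_), so getD is exact there.
  let finalInstances :=
    (PySem.List.enumerate cards 1).foldl
      (fun d p =>
        let nMatches := calculateMatches p.2
        if 0 < nMatches then
          let selfOccurrence := d.getD p.1 0
          (PySem.List.pyRange 0 nMatches).foldl
            (fun d i => d.insert (p.1 + i + 1) (d.getD (p.1 + i + 1) 0 + selfOccurrence)) d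
        else d)
      cardInstances
  finalInstances.values.sum

-- ===== PORT B =====
def part2_alt (cards : List (Int × List Int × List Int)) : Int :=
  let totals := cards.reverse.foldl
    (fun (totals : List Int) card =>
      let nMatches := PySem.Set.len
        (PySem.Set.inter (PySem.Set.ofList card.2.1) (PySem.Set.ofList card.2.2))
      (1 + (PySem.List.slice totals none (some nMatches)).sum) :: totals)
    []
  totals.sum

-- ===== PRECONDITION & SPEC =====
-- number of distinct "my numbers" that are winning (what calculate_matches counts)
def mcSpec (card : Int × List Int × List Int) : Nat :=
  ((PySem.List.dedup card.2.2).filter (fun x => decide (x ∈ card.2.1))).length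

-- Pre_ excludes exactly the inputs where a card's matches overrun the card list,
-- on which A raises KeyError (card_instances[ix + i + 1] with ix + i + 1 > len(cards)).
def Pre_part2 (cards : List (Int × List Int × List Int)) : Prop :=
  ∀ k < cards.length, mcSpec (cards.getD k (0, [], [])) ≤ cards.length - (k + 1)
instance (cards : List (Int × List Int × List Int)) : Decidable (Pre_part2 cards) := by
  unfold Pre_part2; infer_instance

def pvWitness_part2 : (List (Int × List Int × List Int)) := [(1, [5], [5]), (2, [], [])]

def Spec_part2 (cards : List (Int × List Int × List Int)) (out : Int) : Prop := out = part2_alt cards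
instance (cards : List (Int × List Int × List Int)) (out : Int) : Decidable (Spec_part2 cards out) := by unfold Spec_part2; infer_instance

-- ===== CLAIM (what is proved, stated in full; the proofs are below) =====
def Claim_equal_part2 : Prop := ∀ (cards : List (Int × List Int × List Int)), Dom_part2 cards → Pre_part2 cards → Spec_part2 cards (part2 cards)

-- ===== LEMMAS AND PROOFS =====

-- A's match count is mcSpec
lemma calc_eq (card : Int × List Int × List Int) : calculateMatches card = (mcSpec card : Int) := by
  unfold calculateMatches mcSpec
  simp only [PySem.Set.len, PySem.Set.inter, PySem.List.dedup_eq_ofList, Nat.cast_inj]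
  congr 1
  apply List.filter_congr
  intro x _
  simp [PySem.Set.contains, PySem.Set.mem_ofList]

-- B's match count (winning ∩ mine, the other order) has the same cardinality
lemma bcalc_eq (card : Int × List Int × List Int) :
    PySem.Set.len (PySem.Set.inter (PySem.Set.ofList card.2.1) (PySem.Set.ofList card.2.2))
      = (mcSpec card : Int) := by
  rw [← calc_eq]
  unfold calculateMatches
  simp only [PySem.Set.len, Nat.cast_inj, PySem.Set.inter]
  refine List.Perm.length_eq ?_
  refine (List.perm_ext_iff_of_nodup ?_ ?_).mpr ?_
  · exact (PySem.Set.nodup_ofList _).filter _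
  · exact (PySem.Set.nodup_ofList _).filter _
  · intro a
    simp [List.mem_filter, PySem.Set.contains, PySem.Set.mem_ofList]
    tauto

-- ----- abstract versions -----
-- B: per-card total yields, back to front
def bAbs : List (Int × List Int × List Int) → List Int
  | [] => []
  | c :: rest => (1 + ((bAbs rest).take (mcSpec c)).sum) :: bAbs rest

-- add c to the first m entries
def addFirst : Nat → Int → List Int → List Int
  | 0, _, vs => vs
  | _ + 1, _, [] => []
  | m + 1, c, v :: vs => (v + c) :: addFirst m c vs

-- A: final instance counts, front to back
def aVals : List (Int × List Int × List Int) → List Int → List Int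
  | [], vs => vs
  | _ :: _, [] => []
  | c :: rest, v :: vs => v :: aVals rest (addFirst (mcSpec c) v vs)

lemma length_bAbs (cards : List (Int × List Int × List Int)) : (bAbs cards).length = cards.length := by
  induction cards with
  | nil => rfl
  | cons c rest ih => simp [bAbs, ih]

lemma length_addFirst : ∀ (m : Nat) (c : Int) (vs : List Int), (addFirst m c vs).length = vs.length
  | 0, _, _ => rfl
  | _ + 1, _, [] => rfl
  | m + 1, c, v :: vs => by simp [addFirst, length_addFirst m c vs]

lemma foldrB_eq (cards : List (Int × List Int × List Int)) :
    cards.foldr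
      (fun card totals =>
        (1 + (PySem.List.slice totals none (some (PySem.Set.len
          (PySem.Set.inter (PySem.Set.ofList card.2.1) (PySem.Set.ofList card.2.2))))).sum)
          :: totals) []
      = bAbs cards := by
  induction cards with
  | nil => rfl
  | cons c rest ih =>
      rw [List.foldr_cons, ih, bAbs]
      congr 1
      rw [bcalc_eq, PySem.List.slice_to _ (Int.natCast_nonneg _)]
      simp

lemma part2_alt_eq (cards : List (Int × List Int × List Int)) :
    part2_alt cards = (bAbs cards).sum := by
  unfold part2_alt
  rw [List.foldl_reverse]
  exact congrArg List.sum (foldrB_eq cards)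

lemma zip_addFirst (m : Nat) (c : Int) : ∀ (xs ys : List Int), xs.length = ys.length →
    (List.zipWith (· * ·) (addFirst m c xs) ys).sum
      = (List.zipWith (· * ·) xs ys).sum + c * (ys.take m).sum := by
  induction m with
  | zero => intro xs ys _; simp [addFirst]
  | succ m ih =>
      intro xs ys h
      cases xs with
      | nil => cases ys with
        | nil => simp [addFirst]
        | cons y ys => simp at h
      | cons x xs => cases ys with
        | nil => simp at h
        | cons y ys =>
            simp only [addFirst, List.zipWith_cons_cons, List.sum_cons, List.take_succ_cons]
            rw [ih xs ys (by simpa using h)]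
            ring

lemma zip_one : ∀ (ys : List Int), List.zipWith (· * ·) (List.replicate ys.length 1) ys = ys := by
  intro ys
  induction ys with
  | nil => rfl
  | cons y ys ih => simp [List.replicate_succ, ih]

lemma aVals_sum : ∀ (cards : List (Int × List Int × List Int)) (vs : List Int),
    vs.length = cards.length →
    (aVals cards vs).sum = (List.zipWith (· * ·) vs (bAbs cards)).sum := by
  intro cards
  induction cards with
  | nil => intro vs h; cases vs with
    | nil => simp [aVals, bAbs]
    | cons v vs => simp at h
  | cons c rest ih =>
      intro vs h
      cases vs with
      | nil => simp at h
      | cons v vs =>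
          simp only [aVals, bAbs, List.zipWith_cons_cons, List.sum_cons]
          rw [ih (addFirst (mcSpec c) v vs) (by rw [length_addFirst]; simpa using h)]
          rw [zip_addFirst (mcSpec c) v vs (bAbs rest) (by rw [length_bAbs]; simpa using h)]
          ring

-- ----- the dict as a positional list -----
def mkItems (s : Int) : List Int → List (Int × Int)
  | [] => []
  | v :: vs => (s, v) :: mkItems (s + 1) vs

lemma mem_mkItems_bounds : ∀ (vs : List Int) (s : Int) (p : Int × Int),
    p ∈ mkItems s vs → s ≤ p.1 ∧ p.1 < s + vs.length := by
  intro vs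
  induction vs with
  | nil => intro s p hp; simp [mkItems] at hp
  | cons v vs ih =>
      intro s p hp
      simp only [mkItems, List.mem_cons] at hp
      rcases hp with h | h
      · subst h; simp
      · have := ih (s + 1) p h
        simp only [List.length_cons]
        push_cast
        omega

lemma find?_lt (l : List (Int × Int)) (k : Int) (h : ∀ p ∈ l, p.1 < k) :
    l.find? (fun p => p.1 == k) = none := by
  rw [List.find?_eq_none]
  intro p hp
  have := h p hp
  simp only [beq_iff_eq]
  omega

lemma map_id_ne (l : List (Int × Int)) (k : Int) (x : Int) (h : ∀ p ∈ l, p.1 ≠ k) :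
    l.map (fun p => if p.1 == k then (k, x) else p) = l := by
  induction l with
  | nil => rfl
  | cons p l ih =>
      have hp := h p (by simp)
      have hfalse : (p.1 == k) = false := by simpa using hp
      simp only [List.map_cons, hfalse, Bool.false_eq_true, if_false]
      rw [ih (fun q hq => h q (by simp [hq]))]

lemma mkItems_find?_at : ∀ (vs : List Int) (s : Int) (j : Nat), j < vs.length →
    (mkItems s vs).find? (fun p => p.1 == s + (j : Int)) = some (s + (j : Int), vs.getD j 0) := by
  intro vs
  induction vs with
  | nil => intro s j hj; simp at hj
  | cons v vs ih =>
      intro s j hj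
      cases j with
      | zero =>
          rw [show mkItems s (v :: vs) = (s, v) :: mkItems (s + 1) vs from rfl, List.find?_cons]
          simp
      | succ j =>
          have hne : (s == s + ((j + 1 : Nat) : Int)) = false := by simp; omega
          have e : s + ((j + 1 : Nat) : Int) = (s + 1) + (j : Int) := by push_cast; ring
          simp only [mkItems, List.find?_cons, hne]
          rw [e]
          exact ih (s + 1) j (by simpa using hj)

lemma mkItems_map_set : ∀ (vs : List Int) (s : Int) (j : Nat) (x : Int), j < vs.length →
    (mkItems s vs).map (fun p => if p.1 == s + (j : Int) then (s + (j : Int), x) else p)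
      = mkItems s (vs.set j x) := by
  intro vs
  induction vs with
  | nil => intro s j x hj; simp at hj
  | cons v vs ih =>
      intro s j x hj
      cases j with
      | zero =>
          simp only [mkItems, List.map_cons, List.set, Nat.cast_zero, add_zero, beq_self_eq_true,
            if_pos]
          rw [map_id_ne _ s x (fun p hp => by
            have := (mem_mkItems_bounds vs (s + 1) p hp).1; omega)]
      | succ j =>
          have hne : (s == s + ((j + 1 : Nat) : Int)) = false := by simp; omega
          have e : s + ((j + 1 : Nat) : Int) = (s + 1) + (j : Int) := by push_cast; ring
          simp only [mkItems, List.map_cons, hne, Bool.false_eq_true, if_false, List.set]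
          rw [e]
          rw [ih (s + 1) j x (by simpa using hj)]

lemma mkItems_any_at : ∀ (vs : List Int) (s : Int) (j : Nat), j < vs.length →
    ((mkItems s vs).any (fun p => p.1 == s + (j : Int))) = true := by
  intro vs s j hj
  rw [List.any_eq_true]
  have h := mkItems_find?_at vs s j hj
  exact ⟨_, List.mem_of_find?_eq_some h, by simp⟩

-- getD on done ++ mkItems, at position j (key s + j)
lemma getD_mkItems (done : List (Int × Int)) (vs : List Int) (s : Int) (j : Nat)
    (hd : ∀ p ∈ done, p.1 < s) (hj : j < vs.length) :
    (PySem.Dict.mk (done ++ mkItems s vs)).getD (s + (j : Int)) 0 = vs.getD j 0 := by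
  have h1 : done.find? (fun p => p.1 == s + (j : Int)) = none :=
    find?_lt done _ (fun p hp => by have := hd p hp; omega)
  simp [PySem.Dict.getD, PySem.Dict.get?, List.find?_append, h1, mkItems_find?_at vs s j hj]

-- insert on done ++ mkItems, at position j (key s + j)
lemma insert_mkItems (done : List (Int × Int)) (vs : List Int) (s : Int) (j : Nat) (x : Int)
    (hd : ∀ p ∈ done, p.1 < s) (hj : j < vs.length) :
    (PySem.Dict.mk (done ++ mkItems s vs)).insert (s + (j : Int)) x
      = PySem.Dict.mk (done ++ mkItems s (vs.set j x)) := by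
  have hc : (PySem.Dict.mk (done ++ mkItems s vs)).contains (s + (j : Int)) = true := by
    simp only [PySem.Dict.contains, List.any_append]
    rw [mkItems_any_at vs s j hj]
    simp
  simp only [PySem.Dict.insert, hc, if_pos, List.map_append]
  rw [map_id_ne done _ x (fun p hp => by have := hd p hp; omega)]
  rw [mkItems_map_set vs s j x hj]

lemma contains_mkItems_ge (vs : List Int) (s k : Int) (h : s + vs.length ≤ k) :
    (PySem.Dict.mk (mkItems s vs)).contains k = false := by
  simp only [PySem.Dict.contains]
  rw [List.any_eq_false]
  intro p hp
  have := (mem_mkItems_bounds vs s p hp).2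
  simp
  omega

lemma mkItems_append_singleton : ∀ (vs : List Int) (s : Int) (x : Int),
    mkItems s (vs ++ [x]) = mkItems s vs ++ [(s + (vs.length : Int), x)] := by
  intro vs
  induction vs with
  | nil => intro s x; simp [mkItems]
  | cons v vs ih =>
      intro s x
      simp only [List.cons_append, mkItems, ih (s + 1) x, List.length_cons]
      push_cast
      ring_nf

lemma values_mkItems : ∀ (vs : List Int) (s : Int),
    (PySem.Dict.mk (mkItems s vs)).values = vs := by
  intro vs
  induction vs with
  | nil => intro s; rfl
  | cons v vs ih =>
      intro s
      simp only [PySem.Dict.values, mkItems, List.map_cons]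
      have := ih (s + 1)
      simp only [PySem.Dict.values] at this
      rw [this]

lemma init_dict (n : Nat) :
    (PySem.List.pyRange 0 (n : Int)).foldl (fun d i => d.insert (i + 1) 1) PySem.Dict.empty
      = PySem.Dict.mk (mkItems 1 (List.replicate n 1)) := by
  induction n with
  | zero => rfl
  | succ n ih =>
      rw [PySem.List.pyRange_zero_natCast, List.range_succ, List.map_append, List.foldl_append]
      rw [← PySem.List.pyRange_zero_natCast, ih]
      simp only [List.map_cons, List.map_nil, List.foldl_cons, List.foldl_nil]
      have hc : (PySem.Dict.mk (mkItems 1 (List.replicate n 1))).contains ((n : Int) + 1) = false :=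
        contains_mkItems_ge _ _ _ (by simp; omega)
      have e2 : (n : Int) + 1 = 1 + (n : Int) := by ring
      rw [e2] at hc ⊢
      simp only [PySem.Dict.insert, hc, Bool.false_eq_true, if_false]
      have e3 : List.replicate (n + 1) (1 : Int) = List.replicate n 1 ++ [1] := by
        rw [← List.replicate_succ']
      rw [e3, mkItems_append_singleton]
      simp only [List.length_replicate]

lemma addFirst_set : ∀ (m : Nat) (v : Int) (vs : List Int), m < vs.length →
    (addFirst m v vs).set m ((addFirst m v vs).getD m 0 + v) = addFirst (m + 1) v vs := by
  intro m
  induction m with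
  | zero =>
      intro v vs h
      cases vs with
      | nil => simp at h
      | cons w ws => simp [addFirst]
  | succ m ih =>
      intro v vs h
      cases vs with
      | nil => simp at h
      | cons w ws =>
          simp only [addFirst, List.set, List.getD_cons_succ]
          rw [ih v ws (by simpa using h)]

lemma inner_loop (m : Nat) (done : List (Int × Int)) (s : Int) (vs : List Int) (v : Int)
    (hd : ∀ p ∈ done, p.1 < s + 1) (hm : m ≤ vs.length) :
    (PySem.List.pyRange 0 (m : Int)).foldl
      (fun d i => d.insert (s + i + 1) (d.getD (s + i + 1) 0 + v))
      (PySem.Dict.mk (done ++ mkItems (s + 1) vs))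
    = PySem.Dict.mk (done ++ mkItems (s + 1) (addFirst m v vs)) := by
  induction m with
  | zero => rfl
  | succ m ih =>
      rw [PySem.List.pyRange_zero_natCast, List.range_succ, List.map_append, List.foldl_append]
      rw [← PySem.List.pyRange_zero_natCast, ih (by omega)]
      simp only [List.map_cons, List.map_nil, List.foldl_cons, List.foldl_nil]
      have e : s + (m : Int) + 1 = (s + 1) + (m : Int) := by ring
      rw [e]
      have hlen : m < (addFirst m v vs).length := by rw [length_addFirst]; omega
      rw [getD_mkItems done _ (s + 1) m hd hlen]
      rw [insert_mkItems done _ (s + 1) m _ hd hlen]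
      rw [addFirst_set m v vs (by omega)]

lemma outer_loop : ∀ (cards : List (Int × List Int × List Int)) (s : Int)
    (done : List (Int × Int)) (vs : List Int),
    (∀ p ∈ done, p.1 < s) →
    vs.length = cards.length →
    (∀ k < cards.length, mcSpec (cards.getD k (0, [], [])) ≤ cards.length - (k + 1)) →
    (PySem.List.enumerate cards s).foldl
      (fun d p =>
        let nMatches := calculateMatches p.2
        if 0 < nMatches then
          let selfOccurrence := d.getD p.1 0
          (PySem.List.pyRange 0 nMatches).foldl
            (fun d i => d.insert (p.1 + i + 1) (d.getD (p.1 + i + 1) 0 + selfOccurrence)) d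
        else d)
      (PySem.Dict.mk (done ++ mkItems s vs))
    = PySem.Dict.mk (done ++ mkItems s (aVals cards vs)) := by
  intro cards
  induction cards with
  | nil =>
      intro s done vs _ _ _
      simp [aVals]
  | cons c rest ih =>
      intro s done vs hd hlen hb
      cases vs with
      | nil => simp at hlen
      | cons v vs =>
          rw [PySem.List.enumerate_cons, List.foldl_cons]
          have hsplit : done ++ mkItems s (v :: vs) = (done ++ [(s, v)]) ++ mkItems (s + 1) vs := by
            simp [mkItems]
          have hd' : ∀ p ∈ done ++ [(s, v)], p.1 < s + 1 := by
            intro p hp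
            rcases List.mem_append.mp hp with h | h
            · have := hd p h; omega
            · simp at h; subst h; simp
          have hb0 : mcSpec c ≤ vs.length := by
            have := hb 0 (by simp)
            simp at this
            simp at hlen
            omega
          have hbr : ∀ k < rest.length, mcSpec (rest.getD k (0, [], [])) ≤ rest.length - (k + 1) := by
            intro k hk
            have := hb (k + 1) (by simp; omega)
            simpa using this
          have hgoal : done ++ mkItems s (aVals (c :: rest) (v :: vs))
              = (done ++ [(s, v)]) ++ mkItems (s + 1) (aVals rest (addFirst (mcSpec c) v vs)) := by
            simp [aVals, mkItems]
          have hself : (PySem.Dict.mk (done ++ mkItems s (v :: vs))).getD s 0 = v := by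
            have := getD_mkItems done (v :: vs) s 0 hd (by simp)
            simpa using this
          have hstep : (fun (d : PySem.Dict Int Int) (p : Int × (Int × List Int × List Int)) =>
                let nMatches := calculateMatches p.2
                if 0 < nMatches then
                  let selfOccurrence := d.getD p.1 0
                  (PySem.List.pyRange 0 nMatches).foldl
                    (fun d i => d.insert (p.1 + i + 1) (d.getD (p.1 + i + 1) 0 + selfOccurrence)) d
                else d) (PySem.Dict.mk (done ++ mkItems s (v :: vs))) (s, c)
              = PySem.Dict.mk ((done ++ [(s, v)]) ++ mkItems (s + 1) (addFirst (mcSpec c) v vs)) := by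
            show (if 0 < calculateMatches c then
                (PySem.List.pyRange 0 (calculateMatches c)).foldl
                  (fun d i => d.insert (s + i + 1)
                    (d.getD (s + i + 1) 0 + (PySem.Dict.mk (done ++ mkItems s (v :: vs))).getD s 0))
                  (PySem.Dict.mk (done ++ mkItems s (v :: vs)))
              else (PySem.Dict.mk (done ++ mkItems s (v :: vs)))) = _
            rw [calc_eq, hself]
            by_cases hm : 0 < ((mcSpec c : Int))
            · rw [if_pos hm]
              rw [show done ++ mkItems s (v :: vs) = (done ++ [(s, v)]) ++ mkItems (s + 1) vs
                from hsplit]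
              exact inner_loop (mcSpec c) (done ++ [(s, v)]) s vs v hd' hb0
            · rw [if_neg hm]
              have hm0 : mcSpec c = 0 := by omega
              rw [hm0]
              exact congrArg PySem.Dict.mk hsplit
          refine ((congrArg (fun d => List.foldl
              (fun (d : PySem.Dict Int Int) (p : Int × (Int × List Int × List Int)) =>
                let nMatches := calculateMatches p.2
                if 0 < nMatches then
                  let selfOccurrence := d.getD p.1 0
                  (PySem.List.pyRange 0 nMatches).foldl
                    (fun d i => d.insert (p.1 + i + 1) (d.getD (p.1 + i + 1) 0 + selfOccurrence)) d
                else d)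
              d (PySem.List.enumerate rest (s + 1))) hstep).trans
            (ih (s + 1) (done ++ [(s, v)]) (addFirst (mcSpec c) v vs) hd'
              (by rw [length_addFirst]; simpa using hlen) hbr)).trans
            (congrArg PySem.Dict.mk hgoal.symm)

lemma main_eq (cards : List (Int × List Int × List Int)) (hpre : Pre_part2 cards) :
    part2 cards = part2_alt cards := by
  rw [part2_alt_eq]
  unfold Pre_part2 at hpre
  show ((PySem.List.enumerate cards 1).foldl
      (fun d p =>
        let nMatches := calculateMatches p.2
        if 0 < nMatches then
          let selfOccurrence := d.getD p.1 0
          (PySem.List.pyRange 0 nMatches).foldl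
            (fun d i => d.insert (p.1 + i + 1) (d.getD (p.1 + i + 1) 0 + selfOccurrence)) d
        else d)
      ((PySem.List.pyRange 0 (cards.length : Int)).foldl
        (fun d i => d.insert (i + 1) 1) PySem.Dict.empty)).values.sum = (bAbs cards).sum
  rw [init_dict]
  have h := outer_loop cards 1 [] (List.replicate cards.length 1)
    (by simp) (by simp) hpre
  simp only [List.nil_append] at h
  rw [h, values_mkItems]
  rw [aVals_sum cards _ (by simp)]
  rw [show cards.length = (bAbs cards).length from (length_bAbs cards).symm]
  rw [zip_one]

-- ===== VERDICT (by name: the statement is the Claim_ definition above) =====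
theorem part2_spec : Claim_equal_part2 := by
  intro cards _ hpre
  show part2 cards = part2_alt cards
  exact main_eq cards hpre
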